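-- pv_equiv track=rewrite | github.com/shishi11/nlp | speechCollection.py | merge_svos
-- ===== SOURCE A (Python) =====
-- def merge_svos(svos):
--     tmp = []
--     for svo in svos:
--         flag = True
--         for svo_ in svos:
--             if svo_[2].find(svo[2]) > -1 and svo_[2] != svo[2]:
--                 flag = False
--         if (flag):
--             tmp.append(svo)
--     return tmp
-- ===== SOURCE B (Python) =====
-- def merge_svos(svos):
--     objs = list(dict.fromkeys(svo[2] for svo in svos))
--     sizes = {len(o) for o in objs}
--     proper_subs = set(
--         obj[i:i + m]
--         for obj in objs
--         for m in sizes
--         if m < len(obj)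
--         for i in range(len(obj) - m + 1)
--     )
--     return [svo for svo in svos if svo[2] not in proper_subs]
-- ===== Notes on version B (the rewrite author's own statement) =====
-- stated objective: faster
-- what changed: B does no pairwise substring tests at all: it precomputes once a hash set containing every proper slice obj[i:i+m] of each distinct object whose length m is some object's length, then filters the SVO list by a single set-membership pass, whereas A runs a nested O(n^2) scan comparing each object against every other with str.find.
import Mathlib
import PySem

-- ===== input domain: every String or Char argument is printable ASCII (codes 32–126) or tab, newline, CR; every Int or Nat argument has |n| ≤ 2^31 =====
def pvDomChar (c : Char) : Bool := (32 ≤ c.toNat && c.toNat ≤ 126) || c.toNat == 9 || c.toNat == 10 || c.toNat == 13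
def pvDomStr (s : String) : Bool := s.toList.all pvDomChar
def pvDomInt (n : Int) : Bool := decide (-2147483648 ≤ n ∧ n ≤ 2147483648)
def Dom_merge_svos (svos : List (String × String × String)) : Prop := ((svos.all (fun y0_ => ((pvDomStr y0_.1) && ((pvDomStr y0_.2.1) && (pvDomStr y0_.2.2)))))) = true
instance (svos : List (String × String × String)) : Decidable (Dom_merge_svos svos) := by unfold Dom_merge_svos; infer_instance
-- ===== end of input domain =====

-- B builds, once, a set of all proper slices of each distinct object whose length is some
-- object's length, then filters the list by set membership — no pairwise str.find scan
-- (objective: alternative).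

-- ===== PORT A =====
def merge_svos (svos : List (String × String × String)) : List (String × String × String) :=
  svos.foldl (fun tmp svo =>
    let flag := svos.foldl (fun flag svo_ =>
      if PySem.Str.find svo_.2.2 svo.2.2 > -1 && svo_.2.2 != svo.2.2 then false else flag) true
    if flag then tmp ++ [svo] else tmp) []

-- ===== PORT B =====
def merge_svos_alt (svos : List (String × String × String)) : List (String × String × String) :=
  let objs := PySem.List.dedup (svos.map (fun svo => svo.2.2))
  let sizes : PySem.Set Int := PySem.Set.ofList (objs.map (fun o => (o.length : Int)))
  let proper_subs : PySem.Set String := PySem.Set.ofList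
    (objs.flatMap (fun obj =>
      (sizes.filter (fun m => m < (obj.length : Int))).flatMap (fun m =>
        (PySem.List.pyRange 0 ((obj.length : Int) - m + 1) 1).map
          (fun i => PySem.Str.slice obj (some i) (some (i + m))))))
  svos.filter (fun svo => !(PySem.Set.contains proper_subs svo.2.2))

-- ===== PRECONDITION & SPEC =====
def Spec_merge_svos (svos : List (String × String × String)) (out : List (String × String × String)) : Prop := out = merge_svos_alt svos
instance (svos : List (String × String × String)) (out : List (String × String × String)) : Decidable (Spec_merge_svos svos out) := by unfold Spec_merge_svos; infer_instance

-- ===== CLAIM (what is proved, stated in full; the proofs are below) =====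
def Claim_equal_merge_svos : Prop := ∀ (svos : List (String × String × String)), Dom_merge_svos svos → Spec_merge_svos svos (merge_svos svos)

-- ===== LEMMAS AND PROOFS =====

-- A's inner flag loop computes "no element of l satisfies the condition".
theorem inner_flag_eq (l : List (String × String × String)) (o : String) (b : Bool) :
    l.foldl (fun flag svo_ =>
      if PySem.Str.find svo_.2.2 o > -1 && svo_.2.2 != o then false else flag) b
      = (b && !(l.any (fun svo_ => PySem.Str.find svo_.2.2 o > -1 && svo_.2.2 != o))) := by
  induction l generalizing b with
  | nil => simp
  | cons x xs ih =>
    simp only [List.foldl_cons, List.any_cons, ih]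
    cases h : (PySem.Str.find x.2.2 o > -1 && x.2.2 != o) <;> cases b <;> simp_all

-- A's per-element condition, as a proposition
theorem cond_iff (o p : String) :
    (PySem.Str.find p o > -1 && p != o) = true ↔ (o.toList <:+: p.toList ∧ o ≠ p) := by
  have h1 : PySem.Str.find p o > -1 ↔ o.toList <:+: p.toList := by
    rw [← PySem.Str.find_ne_neg_one_iff]
    have := PySem.Chars.neg_one_le_find p.toList o.toList
    simp only [PySem.Str.find] at *
    omega
  simp only [Bool.and_eq_true, decide_eq_true_eq, bne_iff_ne, ne_eq, h1]
  tauto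

-- membership in B's substring pool = being a proper slice (of an object's length) of some object;
-- stated for o itself an object of svos, so that len(o) is one of the enumerated sizes
theorem mem_pool_iff (svos : List (String × String × String)) (o : String)
    (ho : o ∈ svos.map (fun svo => svo.2.2)) :
    (o ∈ (PySem.List.dedup (svos.map (fun svo => svo.2.2))).flatMap (fun obj =>
      ((PySem.Set.ofList ((PySem.List.dedup (svos.map (fun svo => svo.2.2))).map
          (fun o => (o.length : Int)))).filter (fun m => m < (obj.length : Int))).flatMap (fun m =>
        (PySem.List.pyRange 0 ((obj.length : Int) - m + 1) 1).map
          (fun i => PySem.Str.slice obj (some i) (some (i + m))))))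
    ↔ ∃ svo_ ∈ svos, o.toList <:+: svo_.2.2.toList ∧ o ≠ svo_.2.2 := by
  constructor
  · intro h
    obtain ⟨obj, hobj, h⟩ := List.mem_flatMap.1 h
    obtain ⟨m, hm, h⟩ := List.mem_flatMap.1 h
    obtain ⟨i, hi, rfl⟩ := List.mem_map.1 h
    obtain ⟨hmmem, hmlt⟩ := List.mem_filter.1 hm
    rw [PySem.List.mem_pyRange_one] at hi
    simp only [decide_eq_true_eq] at hmlt
    obtain ⟨q, _, hq⟩ := List.mem_map.1 ((PySem.Set.mem_ofList _ _).1 hmmem)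
    obtain ⟨svo_, hmem, rfl⟩ := List.mem_map.1 ((PySem.List.mem_dedup _ _).1 hobj)
    set p := svo_.2.2 with hp
    have hm0 : 0 ≤ m := by omega
    have hlen : p.length = p.toList.length := String.length_toList.symm
    have hslice : (PySem.Str.slice p (some i) (some (i + m))).toList
        = (p.toList.drop i.toNat).take ((i + m).toNat - i.toNat) := by
      rw [PySem.Str.toList_slice, PySem.Chars.slice_eq_listSlice,
        PySem.List.slice_toNat _ hi.1 (by omega)]
    refine ⟨svo_, hmem, ?_, ?_⟩
    · rw [hslice]
      exact List.infix_iff_prefix_suffix.mpr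
        ⟨p.toList.drop i.toNat, List.take_prefix _ _, List.drop_suffix _ _⟩
    · intro hcontra
      have hlens : (PySem.Str.slice p (some i) (some (i + m))).toList.length
          = p.toList.length := by rw [hcontra]
      rw [hslice] at hlens
      simp only [List.length_take, List.length_drop] at hlens
      omega
  · rintro ⟨svo_, hmem, hinf, hne⟩
    set p := svo_.2.2 with hp
    obtain ⟨s, t, hst⟩ := hinf
    have hlen : p.length = p.toList.length := String.length_toList.symm
    have holen : o.length = o.toList.length := String.length_toList.symm
    have hlt : o.toList.length < p.toList.length := by
      rcases lt_or_eq_of_le (List.IsInfix.length_le ⟨s, t, hst⟩) with h | h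
      · exact h
      · exact absurd (String.toList_inj.mp (List.IsInfix.eq_of_length ⟨s, t, hst⟩ h)) hne
    have hplen : p.toList.length = s.length + o.toList.length + t.length := by
      rw [← hst]; simp; omega
    refine List.mem_flatMap.2 ⟨p, (PySem.List.mem_dedup _ _).2 (List.mem_map_of_mem hmem), ?_⟩
    refine List.mem_flatMap.2 ⟨(o.length : Int), ?_, ?_⟩
    · refine List.mem_filter.2 ⟨(PySem.Set.mem_ofList _ _).2 ?_, ?_⟩
      · exact List.mem_map.2 ⟨o, (PySem.List.mem_dedup _ _).2 ho, rfl⟩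
      · simp only [decide_eq_true_eq]; omega
    refine List.mem_map.2 ⟨(s.length : Int), ?_, ?_⟩
    · rw [PySem.List.mem_pyRange_one]
      refine ⟨Int.natCast_nonneg _, by omega⟩
    · apply String.toList_inj.mp
      rw [PySem.Str.toList_slice, PySem.Chars.slice_eq_listSlice, holen,
        PySem.List.slice_natCast_add, ← hst]
      simp

theorem merge_svos_spec : Claim_equal_merge_svos := by
  intro svos _
  show merge_svos svos = merge_svos_alt svos
  unfold merge_svos merge_svos_alt
  simp only [inner_flag_eq, Bool.true_and]
  rw [PySem.List.foldl_append_if_eq_filter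
    (fun svo : String × String × String => !(svos.any (fun svo_ =>
      PySem.Str.find svo_.2.2 svo.2.2 > -1 && svo_.2.2 != svo.2.2))) svos []]
  simp only [List.nil_append]
  apply List.filter_congr
  intro svo hsvo
  congr 1
  rw [Bool.eq_iff_iff, List.any_eq_true, PySem.Set.contains_iff, PySem.Set.mem_ofList,
    mem_pool_iff svos svo.2.2 (List.mem_map_of_mem hsvo)]
  exact ⟨fun ⟨p, hp, hc⟩ => ⟨p, hp, (cond_iff _ _).1 hc⟩,
         fun ⟨p, hp, hc⟩ => ⟨p, hp, (cond_iff _ _).2 hc⟩⟩
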